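-- pv_equiv track=rewrite | github.com/nitesh-77/vlindercli | fleets/support/agents/code-analyst/code_analyst_server.py | extract_relevant_sections
-- ===== SOURCE A (Python) =====
-- def extract_relevant_sections(content, terms, max_chars=2000):
--     """Extract the most relevant sections from a file around term matches."""
--     lines = content.splitlines()
--     relevant_lines = set()
--
--     for i, line in enumerate(lines):
--         lower_line = line.lower()
--         if any(term in lower_line for term in terms):
--             # Include surrounding context (5 lines before and after)
--             for j in range(max(0, i - 5), min(len(lines), i + 6)):
--                 relevant_lines.add(j)
--
--     if not relevant_lines:
--         # No matches — return the first N lines as context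
--         return "\n".join(lines[:30])
--
--     sorted_lines = sorted(relevant_lines)
--     sections = []
--     current_section = []
--     prev = -2
--
--     for idx in sorted_lines:
--         if idx - prev > 1 and current_section:
--             sections.append("\n".join(current_section))
--             current_section = []
--         current_section.append(f"{idx + 1}: {lines[idx]}")
--         prev = idx
--
--     if current_section:
--         sections.append("\n".join(current_section))
--
--     result = "\n...\n".join(sections)
--     return result[:max_chars]
-- ===== SOURCE B (Python) =====
-- def extract_relevant_sections(content, terms, max_chars=2000):
--     """Extract the most relevant sections from a file around term matches."""
--     lines = content.splitlines()
--     n = len(lines)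
--
--     # which lines match a term (each line lowercased and searched once)
--     flags = [any(t in line.lower() for t in terms) for line in lines]
--
--     # x is relevant iff some line within 5 lines of x matches
--     hits = [x for x in range(n)
--             if any(flags[j] for j in range(max(0, x - 5), min(n, x + 6)))]
--     if not hits:
--         # No matches — return the first N lines as context
--         return "\n".join(lines[:30])
--
--     # group consecutive indices, building the group list back-to-front
--     groups = []
--     for idx in reversed(hits):
--         if groups and groups[0][0] == idx + 1:
--             groups[0].insert(0, idx)
--         else:
--             groups.insert(0, [idx])
--
--     sections = ("\n".join(f"{i + 1}: {lines[i]}" for i in g) for g in groups)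
--     return "\n...\n".join(sections)[:max_chars]
-- ===== Notes on version B (the rewrite author's own statement) =====
-- stated objective: alternative
-- what changed: Replaces A's scatter-into-a-set + sort + forward prev/gap grouping by a per-line symmetric window predicate over the index range (no set, no sort) followed by a back-to-front run-grouping pass over the hit indices.
import Mathlib
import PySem

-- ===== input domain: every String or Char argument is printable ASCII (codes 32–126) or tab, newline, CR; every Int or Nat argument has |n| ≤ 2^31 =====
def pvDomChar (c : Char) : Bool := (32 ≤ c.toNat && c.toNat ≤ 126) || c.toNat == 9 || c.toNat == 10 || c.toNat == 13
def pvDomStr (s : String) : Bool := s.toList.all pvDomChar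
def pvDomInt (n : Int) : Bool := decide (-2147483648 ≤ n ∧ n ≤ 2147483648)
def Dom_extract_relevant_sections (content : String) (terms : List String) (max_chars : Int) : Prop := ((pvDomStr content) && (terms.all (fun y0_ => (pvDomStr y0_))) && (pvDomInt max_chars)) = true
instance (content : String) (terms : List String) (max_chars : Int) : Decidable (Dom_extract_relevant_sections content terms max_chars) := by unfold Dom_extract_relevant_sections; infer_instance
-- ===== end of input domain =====

-- B changes the algorithm (per-line window predicate + back-to-front run grouping instead of
-- set + sort + forward gap grouping); same return value, no speed claim.

-- ===== PORT A =====
-- shared with port B: both Pythons test the un-lowercased terms against line.lower() ...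
def pvMatchLine (terms : List String) (line : String) : Bool :=
  terms.any (fun term => PySem.Str.isIn term (PySem.Str.lower line))

-- ... and both format a kept line as f"{i + 1}: {lines[i]}" (the index is always in range here)
def pvLineFmt (lines : List String) (i : Int) : String :=
  PySem.Int.toStr (i + 1) ++ ": " ++ PySem.List.pyGetD lines i ""

-- the body of A's 'for idx in sorted_lines' loop, state = (sections, current_section, prev)
def pvStepA (lines : List String) (st : List String × List String × Int) (idx : Int) :
    List String × List String × Int :=
  let p :=
    if idx - st.2.2 > 1 ∧ st.2.1 ≠ [] then
      (st.1 ++ [PySem.Str.join "\n" st.2.1], ([] : List String))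
    else (st.1, st.2.1)
  (p.1, p.2 ++ [pvLineFmt lines idx], idx)

def extract_relevant_sections (content : String) (terms : List String) (max_chars : Int) : String :=
  let lines := PySem.Str.splitlines content
  let relevant : PySem.Set Int :=
    (PySem.List.enumerate lines 0).foldl
      (fun rel p =>
        if pvMatchLine terms p.2 then
          (PySem.List.pyRange (max 0 (p.1 - 5)) (min (lines.length : Int) (p.1 + 6)) 1).foldl
            (fun r j => PySem.Set.add r j) rel
        else rel)
      PySem.Set.empty
  if relevant = [] then
    PySem.Str.join "\n" (PySem.List.slice lines none (some 30))
  else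
    let sorted_lines := PySem.List.sorted relevant (fun x => x) false
    let st := sorted_lines.foldl (pvStepA lines) ([], [], -2)
    let sections := if st.2.1 ≠ [] then st.1 ++ [PySem.Str.join "\n" st.2.1] else st.1
    PySem.Str.slice (PySem.Str.join "\n...\n" sections) none (some max_chars)

-- ===== PORT B =====
-- B's back-to-front grouping loop ('for idx in reversed(hits)' prepending to groups) as a foldr
def pvGroups : List Int → List (List Int)
  | [] => []
  | x :: xs =>
    match pvGroups xs with
    | (y :: g) :: rest => if y = x + 1 then (x :: y :: g) :: rest else [x] :: (y :: g) :: rest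
    | _ => [[x]]

def pvNear (flags : List Bool) (x : Int) : Bool :=
  (PySem.List.pyRange (max 0 (x - 5)) (min (flags.length : Int) (x + 6)) 1).any
    (fun j => PySem.List.pyGetD flags j false)

def extract_relevant_sections_alt (content : String) (terms : List String) (max_chars : Int) : String :=
  let lines := PySem.Str.splitlines content
  let flags := lines.map (pvMatchLine terms)
  let hits := (PySem.List.pyRange 0 (lines.length : Int) 1).filter (pvNear flags)
  if hits = [] then
    PySem.Str.join "\n" (PySem.List.slice lines none (some 30))
  else
    PySem.Str.slice
      (PySem.Str.join "\n...\n"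
        ((pvGroups hits).map (fun g => PySem.Str.join "\n" (g.map (pvLineFmt lines)))))
      none (some max_chars)

-- ===== PRECONDITION & SPEC =====
def Spec_extract_relevant_sections (content : String) (terms : List String) (max_chars : Int) (out : String) : Prop := out = extract_relevant_sections_alt content terms max_chars
instance (content : String) (terms : List String) (max_chars : Int) (out : String) : Decidable (Spec_extract_relevant_sections content terms max_chars out) := by unfold Spec_extract_relevant_sections; infer_instance

-- ===== CLAIM (what is proved, stated in full; the proofs are below) =====
def Claim_equal_extract_relevant_sections : Prop := ∀ (content : String) (terms : List String) (max_chars : Int), Dom_extract_relevant_sections content terms max_chars → Spec_extract_relevant_sections content terms max_chars (extract_relevant_sections content terms max_chars)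

-- ===== LEMMAS AND PROOFS =====

-- membership of the inner 'for j in range(...): relevant_lines.add(j)' fold
theorem pv_mem_foldl_add (js : List Int) (acc : PySem.Set Int) (x : Int) :
    x ∈ js.foldl (fun r j => PySem.Set.add r j) acc ↔ x ∈ acc ∨ x ∈ js := by
  induction js generalizing acc with
  | nil => simp
  | cons j js ih =>
    simp [List.foldl_cons, ih, PySem.Set.mem_add]
    tauto

theorem pv_nodup_foldl_add (js : List Int) (acc : PySem.Set Int) (h : acc.Nodup) :
    (js.foldl (fun r j => PySem.Set.add r j) acc).Nodup := by
  induction js generalizing acc with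
  | nil => exact h
  | cons j js ih => exact ih _ (PySem.Set.nodup_add acc j h)

-- membership of A's outer fold over enumerate(lines)
theorem pv_mem_relevant_fold (terms : List String) (n : Int) (ps : List (Int × String))
    (acc : PySem.Set Int) (x : Int) :
    x ∈ ps.foldl
        (fun rel p =>
          if pvMatchLine terms p.2 then
            (PySem.List.pyRange (max 0 (p.1 - 5)) (min n (p.1 + 6)) 1).foldl
              (fun r j => PySem.Set.add r j) rel
          else rel) acc ↔
      x ∈ acc ∨ ∃ p ∈ ps, pvMatchLine terms p.2 = true ∧ max 0 (p.1 - 5) ≤ x ∧ x < min n (p.1 + 6) := by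
  induction ps generalizing acc with
  | nil => simp
  | cons p ps ih =>
    simp only [List.foldl_cons]
    by_cases hm : pvMatchLine terms p.2 = true
    · rw [if_pos hm, ih, pv_mem_foldl_add, PySem.List.mem_pyRange_one]
      constructor
      · rintro ((h | h) | ⟨q, hq, h⟩)
        · exact Or.inl h
        · exact Or.inr ⟨p, List.mem_cons_self, hm, h.1, h.2⟩
        · exact Or.inr ⟨q, List.mem_cons_of_mem _ hq, h⟩
      · rintro (h | ⟨q, hq, h⟩)
        · exact Or.inl (Or.inl h)
        · rcases List.mem_cons.1 hq with rfl | hq'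
          · exact Or.inl (Or.inr ⟨h.2.1, h.2.2⟩)
          · exact Or.inr ⟨q, hq', h⟩
    · rw [if_neg hm, ih]
      simp only [List.mem_cons]
      constructor
      · rintro (h | ⟨q, hq, h⟩)
        · exact Or.inl h
        · exact Or.inr ⟨q, Or.inr hq, h⟩
      · rintro (h | ⟨q, hq | hq, h⟩)
        · exact Or.inl h
        · exact absurd (hq ▸ h.1) hm
        · exact Or.inr ⟨q, hq, h⟩

theorem pv_nodup_relevant_fold (terms : List String) (n : Int) (ps : List (Int × String))
    (acc : PySem.Set Int) (h : acc.Nodup) :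
    (ps.foldl
        (fun rel p =>
          if pvMatchLine terms p.2 then
            (PySem.List.pyRange (max 0 (p.1 - 5)) (min n (p.1 + 6)) 1).foldl
              (fun r j => PySem.Set.add r j) rel
          else rel) acc).Nodup := by
  induction ps generalizing acc with
  | nil => exact h
  | cons p ps ih =>
    simp only [List.foldl_cons]
    split
    · exact ih _ (pv_nodup_foldl_add _ _ h)
    · exact ih _ h

-- the relevant set and B's hits list have the same members
theorem pv_mem_relevant_iff_near (terms : List String) (lines : List String) (x : Int) :
    (∃ p ∈ PySem.List.enumerate lines 0, pvMatchLine terms p.2 = true ∧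
        max 0 (p.1 - 5) ≤ x ∧ x < min (lines.length : Int) (p.1 + 6)) ↔
      (0 ≤ x ∧ x < (lines.length : Int)) ∧
        pvNear (lines.map (pvMatchLine terms)) x = true := by
  have hlen : ((lines.map (pvMatchLine terms)).length : Int) = (lines.length : Int) := by simp
  constructor
  · rintro ⟨p, hp, hm, h1, h2⟩
    obtain ⟨k, hk, rfl⟩ := (PySem.List.mem_enumerate_iff lines 0 p).1 hp
    have hx0 : 0 ≤ x := le_trans (le_max_left _ _) h1
    have hxn : x < (lines.length : Int) := lt_of_lt_of_le h2 (min_le_left _ _)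
    refine ⟨⟨hx0, hxn⟩, ?_⟩
    simp only [pvNear, List.any_eq_true, hlen]
    refine ⟨(k : Int), ?_, ?_⟩
    · rw [PySem.List.mem_pyRange_one]
      simp only [zero_add] at h1 h2
      omega
    · rw [PySem.List.pyGetD_eq_getElem (lines.map (pvMatchLine terms)) false (by positivity)
        (by simp; exact_mod_cast hk)]
      simp only [zero_add] at hm
      simpa using hm
  · rintro ⟨⟨hx0, hxn⟩, hnear⟩
    simp only [pvNear, List.any_eq_true, hlen] at hnear
    obtain ⟨j, hj, hm⟩ := hnear
    rw [PySem.List.mem_pyRange_one] at hj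
    have hj0 : 0 ≤ j := le_trans (le_max_left _ _) hj.1
    have hjn : j < (lines.length : Int) := lt_of_lt_of_le hj.2 (min_le_left _ _)
    refine ⟨(j, lines[j.toNat]'(by omega)), ?_, ?_, ?_, ?_⟩
    · rw [PySem.List.mem_enumerate_iff]
      exact ⟨j.toNat, by omega, by simp; omega⟩
    · rw [PySem.List.pyGetD_eq_getElem (lines.map (pvMatchLine terms)) false hj0 (by simpa)] at hm
      simpa using hm
    · simp only; omega
    · simp only; omega

-- ---- grouping: characterisation of pvGroups and of A's forward fold ----

theorem pvGroups_cons_head (x : Int) (xs : List Int) :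
    ∃ g gs, pvGroups (x :: xs) = (x :: g) :: gs := by
  induction xs generalizing x with
  | nil => exact ⟨[], [], rfl⟩
  | cons y ys ih =>
    obtain ⟨g, gs, hg⟩ := ih y
    by_cases h : y = x + 1
    · exact ⟨y :: g, gs, by rw [pvGroups, hg]; simp [h]⟩
    · exact ⟨[], (y :: g) :: gs, by rw [pvGroups, hg]; simp [h]⟩

theorem pvGroups_cons2 (x y : Int) (ys g : List Int) (gs : List (List Int))
    (hg : pvGroups (y :: ys) = (y :: g) :: gs) :
    pvGroups (x :: y :: ys) =
      if y = x + 1 then (x :: y :: g) :: gs else [x] :: (y :: g) :: gs := by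
  rw [pvGroups, hg]

def pvJF (lines : List String) (g : List Int) : String :=
  PySem.Str.join "\n" (g.map (pvLineFmt lines))

-- A's sections after the loop, for a loop entered with a (nonempty) current section
def pvFinish (lines : List String) (st : List String × List String × Int) : List String :=
  st.1 ++ (if st.2.1 ≠ [] then [PySem.Str.join "\n" st.2.1] else [])

theorem pvFinish_eq (lines : List String) (st : List String × List String × Int) :
    pvFinish lines st =
      if st.2.1 ≠ [] then st.1 ++ [PySem.Str.join "\n" st.2.1] else st.1 := by
  unfold pvFinish; split <;> simp

def pvGlue (lines : List String) (cur : List String) (prev : Int) : List (List Int) → List String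
  | [] => [PySem.Str.join "\n" cur]
  | g :: gs =>
    if g.head? = some (prev + 1) then
      PySem.Str.join "\n" (cur ++ g.map (pvLineFmt lines)) :: gs.map (pvJF lines)
    else
      PySem.Str.join "\n" cur :: (g :: gs).map (pvJF lines)

-- a group list opened with a fresh one-line section: exactly B's per-group strings
theorem pv_glue_fresh (lines : List String) (x : Int) (xs : List Int) :
    pvGlue lines [pvLineFmt lines x] x (pvGroups xs) =
      (pvGroups (x :: xs)).map (pvJF lines) := by
  cases xs with
  | nil => simp [pvGlue, pvGroups, pvJF]
  | cons y ys =>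
    obtain ⟨g, gs, hg⟩ := pvGroups_cons_head y ys
    rw [hg, pvGroups_cons2 x y ys g gs hg]
    by_cases hy : y = x + 1
    · subst hy
      simp [pvGlue, pvJF]
    · simp [pvGlue, hy, pvJF]

-- the gap-≤-1 step merges x into the current section
theorem pv_glue_merge (lines : List String) (cur : List String) (prev x : Int) (xs : List Int)
    (hx : x = prev + 1) :
    pvGlue lines cur prev (pvGroups (x :: xs)) =
      pvGlue lines (cur ++ [pvLineFmt lines x]) x (pvGroups xs) := by
  cases xs with
  | nil => simp [pvGlue, pvGroups, hx, pvJF]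
  | cons y ys =>
    obtain ⟨g, gs, hg⟩ := pvGroups_cons_head y ys
    rw [pvGroups_cons2 x y ys g gs hg, hg]
    by_cases hy : y = x + 1
    · rw [if_pos hy]
      simp [pvGlue, hx, hy]
    · rw [if_neg hy]
      simp [pvGlue, hx, pvJF]
      omega

-- the gap-> 1 step closes the current section and opens a fresh one
theorem pv_glue_flush (lines : List String) (cur : List String) (prev x : Int) (xs : List Int)
    (hx : x ≠ prev + 1) :
    pvGlue lines cur prev (pvGroups (x :: xs)) =
      PySem.Str.join "\n" cur :: pvGlue lines [pvLineFmt lines x] x (pvGroups xs) := by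
  obtain ⟨g0, gs0, hg0⟩ := pvGroups_cons_head x xs
  rw [pv_glue_fresh, hg0, pvGlue]
  rw [if_neg (by simp [hx])]

theorem pv_foldA_glue (lines : List String) (l : List Int) :
    ∀ (secs cur : List String) (prev : Int), l.Pairwise (· < ·) → (∀ z ∈ l, prev < z) →
      cur ≠ [] →
      pvFinish lines (l.foldl (pvStepA lines) (secs, cur, prev)) =
        secs ++ pvGlue lines cur prev (pvGroups l) := by
  induction l with
  | nil =>
    intro secs cur prev _ _ hcur
    simp [pvFinish, pvGlue, pvGroups, hcur]
  | cons x xs ih =>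
    intro secs cur prev hpw hgt hcur
    have hx : prev < x := hgt x (List.mem_cons_self)
    have hpw' : xs.Pairwise (· < ·) := hpw.of_cons
    have hgt' : ∀ z ∈ xs, x < z := fun z hz => (List.pairwise_cons.1 hpw).1 z hz
    simp only [List.foldl_cons]
    by_cases hmerge : x = prev + 1
    · -- no flush: idx - prev = 1
      have hstep : pvStepA lines (secs, cur, prev) x = (secs, cur ++ [pvLineFmt lines x], x) := by
        simp [pvStepA, hmerge]
      rw [hstep, ih secs (cur ++ [pvLineFmt lines x]) x hpw' hgt' (by simp),
        pv_glue_merge lines cur prev x xs hmerge]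
    · -- flush: prev < x and x ≠ prev + 1, so idx - prev > 1 and current is nonempty
      have hstep : pvStepA lines (secs, cur, prev) x =
          (secs ++ [PySem.Str.join "\n" cur], [pvLineFmt lines x], x) := by
        simp only [pvStepA]
        rw [if_pos ⟨by omega, hcur⟩]
        simp
      rw [hstep, ih _ [pvLineFmt lines x] x hpw' hgt' (by simp),
        pv_glue_flush lines cur prev x xs hmerge, List.append_assoc]
      rfl

-- A's whole grouping loop (started at ([], [], -2)) produces exactly B's per-group strings
theorem pv_foldA_groups (lines : List String) (l : List Int) (hne : l ≠ [])
    (hpw : l.Pairwise (· < ·)) :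
    pvFinish lines (l.foldl (pvStepA lines) ([], [], -2)) =
      (pvGroups l).map (pvJF lines) := by
  obtain ⟨x, xs, rfl⟩ := List.exists_cons_of_ne_nil hne
  have hstep : pvStepA lines ([], [], -2) x = ([], [pvLineFmt lines x], x) := by
    simp [pvStepA]
  simp only [List.foldl_cons, hstep]
  rw [pv_foldA_glue lines xs [] [pvLineFmt lines x] x hpw.of_cons
      (fun z hz => (List.pairwise_cons.1 hpw).1 z hz) (by simp)]
  rw [pv_glue_fresh]
  rfl

-- ===== VERDICT (by name: the statement is the Claim_ definition above) =====
theorem extract_relevant_sections_spec : Claim_equal_extract_relevant_sections := by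
  intro content terms max_chars _
  unfold Spec_extract_relevant_sections extract_relevant_sections extract_relevant_sections_alt
  simp only []
  set lines := PySem.Str.splitlines content with hlines
  set relevant : PySem.Set Int :=
    (PySem.List.enumerate lines 0).foldl
      (fun rel p =>
        if pvMatchLine terms p.2 then
          (PySem.List.pyRange (max 0 (p.1 - 5)) (min (lines.length : Int) (p.1 + 6)) 1).foldl
            (fun r j => PySem.Set.add r j) rel
        else rel)
      PySem.Set.empty with hrel
  set flags := lines.map (pvMatchLine terms) with hflags
  set hits := (PySem.List.pyRange 0 (lines.length : Int) 1).filter (pvNear flags) with hhits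
  -- same membership
  have hmem : ∀ x, x ∈ relevant ↔ x ∈ hits := by
    intro x
    rw [hrel, pv_mem_relevant_fold, hhits, hflags, List.mem_filter]
    simp only [PySem.Set.empty]
    rw [PySem.List.mem_pyRange_one]
    simp only [List.not_mem_nil, false_or]
    exact (pv_mem_relevant_iff_near terms lines x).trans (by tauto)
  have hnd_rel : relevant.Nodup := pv_nodup_relevant_fold _ _ _ _ (by simp [PySem.Set.empty])
  have hnd_hits : hits.Nodup := (PySem.List.nodup_pyRange_one 0 _).filter _
  have hperm : hits.Perm relevant := by
    refine List.perm_of_nodup_nodup_toFinset_eq hnd_hits hnd_rel ?_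
    ext x
    simp [List.mem_toFinset, hmem x]
  have hpw : hits.Pairwise (· < ·) :=
    (PySem.List.pairwise_lt_pyRange_one 0 _).filter _
  by_cases hempty : hits = ([] : List Int)
  · have hrnil : relevant = ([] : List Int) := by
      rw [hempty] at hperm
      exact hperm.nil_eq.symm
    rw [if_pos hrnil, if_pos hempty]
  · have hrne : relevant ≠ ([] : List Int) := by
      intro h
      rw [h] at hperm
      exact hempty hperm.eq_nil
    rw [if_neg hrne, if_neg hempty]
    have hsorted : PySem.List.sorted relevant (fun x => x) false = hits :=
      PySem.List.sorted_eq_of_perm_of_pairwise_lt relevant hits _ hperm hpw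
    rw [hsorted, ← pvFinish_eq lines (hits.foldl (pvStepA lines) ([], [], -2)),
      pv_foldA_groups lines hits hempty hpw]
    rfl
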